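-- pv_equiv track=rewrite | github.com/siemhermans/screenos-config-parser | parser.py | sos_combine_policy_rules
-- ===== SOURCE A (Python) =====
-- def sos_combine_policy_rules(data):
--     """  # TODO: Fix description
--     Combines separate ScreenOS policy rules into a list based on the unique policy identifier.
--     :param data:
--     :return:
--     """
--     include_line = False
--     policy_set, unique_policy = ([] for i in range(2))
--
--     for line in data:
--         line = line.rstrip('\n')
--         # Grab everything from 'set policy id' to 'exit'
--         if 'set policy id' in line:
--             include_line = True
--         elif 'exit' in line:
--             include_line = False
--
--         if include_line:
--             unique_policy.append(line)
--         elif not include_line: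
--             policy_set.append(unique_policy)
--             unique_policy = []
--
--     policy_set = [i for i in policy_set if i]  # Remove empty lists created for non-policy lines
--     return policy_set
-- ===== SOURCE B (Python) =====
-- def sos_combine_policy_rules(data):
--     """Staged pipeline: strip, split the stream at terminator lines (dropping the
--     unterminated tail segment), then take each segment's suffix from its first
--     'set policy id' line as the block."""
--     lines = [l.rstrip('\n') for l in data]
--     segments = []
--     seg = []
--     for l in lines:
--         if 'exit' in l and 'set policy id' not in l:
--             segments.append(seg)
--             seg = []
--         else:
--             seg.append(l)
--     result = []
--     for seg in segments:
--         while seg and 'set policy id' not in seg[0]: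
--             seg = seg[1:]
--         if seg:
--             result.append(seg)
--     return result
-- ===== Notes on version B (the rewrite author's own statement) =====
-- stated objective: alternative
-- what changed: B replaces A's single-pass include-flag state machine by a staged pipeline: strip all lines, split the stream into segments at 'exit' terminator lines (discarding the unterminated tail), then emit each segment's suffix starting at its first 'set policy id' line.
import Mathlib
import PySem

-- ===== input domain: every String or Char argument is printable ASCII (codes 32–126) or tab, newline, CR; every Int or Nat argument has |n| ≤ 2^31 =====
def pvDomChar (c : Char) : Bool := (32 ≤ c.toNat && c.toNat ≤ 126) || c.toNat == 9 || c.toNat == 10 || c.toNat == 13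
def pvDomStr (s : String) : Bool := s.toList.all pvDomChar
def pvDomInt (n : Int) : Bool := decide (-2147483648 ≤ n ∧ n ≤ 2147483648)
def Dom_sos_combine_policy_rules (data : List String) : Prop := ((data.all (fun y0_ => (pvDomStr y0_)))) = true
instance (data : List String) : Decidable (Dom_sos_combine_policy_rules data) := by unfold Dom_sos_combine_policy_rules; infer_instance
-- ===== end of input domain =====

-- B replaces A's single-pass include-flag state machine by a staged pipeline (strip; split at
-- 'exit' terminator lines, dropping the unterminated tail; take each segment's suffix from its
-- first 'set policy id' line). Return value only; neither version mutates its argument.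

-- line.rstrip('\n'): drop trailing '\n' characters (exact port of Python's str.rstrip('\n'))
def pvRstripNl (s : String) : String := String.ofList ((s.toList.reverse.dropWhile (· == '\n')).reverse)

-- ===== PORT A =====
def sosAStep : (Bool × List (List String) × List String) → String → (Bool × List (List String) × List String)
  | (inc, ps, up), line0 =>
    let line := pvRstripNl line0
    let inc' := if PySem.Str.isIn "set policy id" line then true
                else if PySem.Str.isIn "exit" line then false
                else inc
    if inc' then (inc', ps, up ++ [line])
    else (inc', ps ++ [up], [])

def sos_combine_policy_rules (data : List String) : List (List String) :=
  ((data.foldl sosAStep (false, [], [])).2.1).filter (fun i => !i.isEmpty)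

-- ===== PORT B =====
-- 'exit' in l and 'set policy id' not in l
def sosIsEnd (l : String) : Bool := PySem.Str.isIn "exit" l && !PySem.Str.isIn "set policy id" l

-- stage 2 loop: split the stripped lines at terminator lines
def sosSegStep : (List (List String) × List String) → String → (List (List String) × List String)
  | (segs, seg), l => if sosIsEnd l then (segs ++ [seg], []) else (segs, seg ++ [l])

-- stage 3 'while seg and ...: seg = seg[1:]'
def sosDropStart : List String → List String
  | [] => []
  | l :: rest => if PySem.Str.isIn "set policy id" l then l :: rest else sosDropStart rest

def sosProcStep (res : List (List String)) (seg : List String) : List (List String) :=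
  let b := sosDropStart seg
  if b.isEmpty then res else res ++ [b]

def sos_combine_policy_rules_alt (data : List String) : List (List String) :=
  let lines := data.map pvRstripNl
  ((lines.foldl sosSegStep ([], [])).1).foldl sosProcStep []

-- ===== PRECONDITION & SPEC =====
def Spec_sos_combine_policy_rules (data : List String) (out : List (List String)) : Prop := out = sos_combine_policy_rules_alt data
instance (data : List String) (out : List (List String)) : Decidable (Spec_sos_combine_policy_rules data out) := by unfold Spec_sos_combine_policy_rules; infer_instance

-- ===== CLAIM (what is proved, stated in full; the proofs are below) =====
def Claim_equal_sos_combine_policy_rules : Prop := ∀ (data : List String), Dom_sos_combine_policy_rules data → Spec_sos_combine_policy_rules data (sos_combine_policy_rules data)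

-- ===== LEMMAS AND PROOFS =====

theorem sosDropStart_append_single (seg : List String) (l : String) :
    sosDropStart (seg ++ [l]) =
      if (sosDropStart seg).isEmpty then sosDropStart [l] else sosDropStart seg ++ [l] := by
  induction seg with
  | nil => simp [sosDropStart]
  | cons h t ih =>
    by_cases hs : PySem.Str.isIn "set policy id" h = true
    · simp only [List.cons_append, sosDropStart, hs, reduceIte, List.isEmpty_cons]
      simp
    · simp only [List.cons_append, sosDropStart, hs, ih]
      simp

-- Loop invariant linking A's state machine to B's pipeline: A's pending block 'up' is the
-- suffix of B's current segment from its first 'set policy id' line, A's flag is 'up ≠ []',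
-- and A's policy_set filtered of empties equals B's processed finished segments.
theorem sos_loop_inv (rest : List String) (segs ps : List (List String)) (seg up : List String)
    (hup : sosDropStart seg = up)
    (hps : ps.filter (fun i => !i.isEmpty) = segs.foldl sosProcStep []) :
    ((rest.foldl sosAStep (!up.isEmpty, ps, up)).2.1).filter (fun i => !i.isEmpty)
      = ((rest.foldl (fun s l => sosSegStep s (pvRstripNl l)) (segs, seg)).1).foldl sosProcStep [] := by
  induction rest generalizing segs ps seg up with
  | nil => simpa using hps
  | cons line0 t ih =>
    simp only [List.foldl_cons]
    by_cases hspi : PySem.Str.isIn "set policy id" (pvRstripNl line0) = true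
    · -- start line: both sides append it to the pending block / segment
      simp at hspi
      have hd : sosDropStart (seg ++ [pvRstripNl line0]) = up ++ [pvRstripNl line0] := by
        rw [sosDropStart_append_single, hup]
        cases up with
        | nil => simp [sosDropStart, hspi]
        | cons a b => simp
      have stepA : sosAStep (!up.isEmpty, ps, up) line0 = (true, ps, up ++ [pvRstripNl line0]) := by
        simp [sosAStep, hspi]
      have stepB : sosSegStep (segs, seg) (pvRstripNl line0) = (segs, seg ++ [pvRstripNl line0]) := by
        simp [sosSegStep, sosIsEnd, hspi]
      have hflag : (!(up ++ [pvRstripNl line0]).isEmpty) = true := by cases up <;> rfl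
      have h2 := ih segs ps (seg ++ [pvRstripNl line0]) (up ++ [pvRstripNl line0]) hd hps
      rw [hflag] at h2
      rw [stepA, stepB]; exact h2
    · by_cases hex : PySem.Str.isIn "exit" (pvRstripNl line0) = true
      · -- terminator line: A flushes up into ps, B closes the segment
        simp at hspi hex
        have hps' : (ps ++ [up]).filter (fun i => !i.isEmpty)
            = (segs ++ [seg]).foldl sosProcStep [] := by
          rw [List.foldl_append, ← hps]
          simp only [List.foldl_cons, List.foldl_nil, sosProcStep, hup]
          cases up <;> simp [List.filter_append]
        have stepA : sosAStep (!up.isEmpty, ps, up) line0 = (false, ps ++ [up], []) := by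
          simp [sosAStep, hspi, hex]
        have stepB : sosSegStep (segs, seg) (pvRstripNl line0) = (segs ++ [seg], []) := by
          simp [sosSegStep, sosIsEnd, hspi, hex]
        have h2 := ih (segs ++ [seg]) (ps ++ [up]) [] [] rfl hps'
        rw [show (!(List.isEmpty ([] : List String))) = false from rfl] at h2
        rw [stepA, stepB]; exact h2
      · -- ordinary line
        simp at hspi hex
        cases up with
        | nil =>
          -- flag off: A appends an empty list to ps (filtered away), B extends the segment
          have hd : sosDropStart (seg ++ [pvRstripNl line0]) = [] := by
            rw [sosDropStart_append_single, hup]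
            simp [sosDropStart, hspi]
          have hps' : (ps ++ [[]]).filter (fun i => !i.isEmpty)
              = segs.foldl sosProcStep [] := by
            rw [List.filter_append, ← hps]; simp
          have stepA : sosAStep (!(List.isEmpty ([] : List String)), ps, []) line0
              = (false, ps ++ [[]], []) := by
            simp [sosAStep, hspi, hex]
          have stepB : sosSegStep (segs, seg) (pvRstripNl line0) = (segs, seg ++ [pvRstripNl line0]) := by
            simp [sosSegStep, sosIsEnd, hex]
          have h2 := ih segs (ps ++ [[]]) (seg ++ [pvRstripNl line0]) [] hd hps'
          rw [show (!(List.isEmpty ([] : List String))) = false from rfl] at h2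
          rw [stepA, stepB]; exact h2
        | cons a b =>
          -- flag on: both sides append the line
          have hd : sosDropStart (seg ++ [pvRstripNl line0]) = (a :: b) ++ [pvRstripNl line0] := by
            rw [sosDropStart_append_single, hup]
            simp
          have stepA : sosAStep (!(List.isEmpty (a :: b)), ps, a :: b) line0
              = (true, ps, (a :: b) ++ [pvRstripNl line0]) := by
            simp [sosAStep, hspi, hex]
          have stepB : sosSegStep (segs, seg) (pvRstripNl line0) = (segs, seg ++ [pvRstripNl line0]) := by
            simp [sosSegStep, sosIsEnd, hex]
          have h2 := ih segs ps (seg ++ [pvRstripNl line0]) ((a :: b) ++ [pvRstripNl line0]) hd hps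
          rw [show (!(List.isEmpty ((a :: b) ++ [pvRstripNl line0]))) = true from rfl] at h2
          rw [stepA, stepB]; exact h2

-- ===== VERDICT (by name: the statement is the Claim_ definition above) =====
theorem sos_combine_policy_rules_spec : Claim_equal_sos_combine_policy_rules := by
  intro data _
  unfold Spec_sos_combine_policy_rules sos_combine_policy_rules sos_combine_policy_rules_alt
  simpa [List.foldl_map] using sos_loop_inv data [] [] [] [] rfl rfl
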